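-- pv_equiv track=rewrite | github.com/withNoclout/LeetCode_Easy | quiz_1725_countGoodrectangke.py | countGoodRectangles
-- ===== SOURCE A (Python) =====
-- def countGoodRectangles(rectangles):
--     """
--     :type rectangles: List[List[int]]
--     :rtype: int
--     """
--     max_length = 0
--     count = 0
--     for length , width in rectangles :
--         curr_len = min( length , width )
--         if curr_len > max_length :
--             max_length = curr_len
--             count = 1
--         elif curr_len == max_length :
--             count += 1
--     return count
-- ===== SOURCE B (Python) =====
-- def countGoodRectangles(rectangles):
--     sides = [min(l, w) for l, w in rectangles]
--     return sides.count(max([0, *sides]))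
-- ===== Notes on version B (the rewrite author's own statement) =====
-- stated objective: simpler
-- what changed: Replaces A's fused running-max-and-count loop by building the list of short sides once, then taking max([0, *sides]) and counting its occurrences with list.count.
import Mathlib
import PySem

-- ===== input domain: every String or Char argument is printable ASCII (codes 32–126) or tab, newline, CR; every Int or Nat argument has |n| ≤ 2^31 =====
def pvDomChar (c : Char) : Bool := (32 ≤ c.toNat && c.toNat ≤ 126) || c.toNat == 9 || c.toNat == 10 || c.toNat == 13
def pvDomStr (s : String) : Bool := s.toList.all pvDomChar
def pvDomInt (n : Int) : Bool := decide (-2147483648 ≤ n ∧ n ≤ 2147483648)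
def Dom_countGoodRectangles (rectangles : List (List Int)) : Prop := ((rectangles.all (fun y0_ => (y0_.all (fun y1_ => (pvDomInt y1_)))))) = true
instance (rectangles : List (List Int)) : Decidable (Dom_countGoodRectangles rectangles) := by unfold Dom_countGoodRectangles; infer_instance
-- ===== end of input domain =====

-- B builds the list of short sides once, then returns sides.count(max([0,*sides])) — a
-- comprehension plus two library scans instead of A's fused running-max-and-count loop.


-- ===== PORT A =====
-- fused loop carrying (max_length, count); a non-2-element row would raise in Python
-- (ValueError on unpacking) and is excluded by Pre_ — the port leaves the state unchanged there.
def countGoodRectangles (rectangles : List (List Int)) : Int :=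
  (rectangles.foldl
    (fun (st : Int × Int) r =>
      match r with
      | [length, width] =>
        let curr_len := min length width
        if curr_len > st.1 then (curr_len, 1)
        else if curr_len = st.1 then (st.1, st.2 + 1)
        else st
      | _ => st)
    (0, 0)).2

-- ===== PORT B =====
-- sides = [min(l, w) for l, w in rectangles]; return sides.count(max([0, *sides]))
-- the unpacking 'l, w' is ported as the row's elements 0 and 1 (Pre_ guarantees length 2,
-- where Python's unpacking would otherwise raise)
def countGoodRectangles_alt (rectangles : List (List Int)) : Int :=
  let sides := rectangles.map (fun r => min (r.getD 0 0) (r.getD 1 0))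
  ((PySem.List.count sides (((PySem.List.max? (0 :: sides) (fun y => y)).getD 0))) : Int)

-- ===== PRECONDITION & SPEC =====
-- Pre_ excludes rows that are not exactly [length, width]: Python A raises ValueError
-- unpacking them (and B raises the same way).
def Pre_countGoodRectangles (rectangles : List (List Int)) : Prop :=
  ∀ r ∈ rectangles, r.length = 2
instance (rectangles : List (List Int)) : Decidable (Pre_countGoodRectangles rectangles) := by unfold Pre_countGoodRectangles; infer_instance
def pvWitness_countGoodRectangles : List (List Int) := [[3, 5], [4, 4], [2, 9]]
def Spec_countGoodRectangles (rectangles : List (List Int)) (out : Int) : Prop := out = countGoodRectangles_alt rectangles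
instance (rectangles : List (List Int)) (out : Int) : Decidable (Spec_countGoodRectangles rectangles out) := by unfold Spec_countGoodRectangles; infer_instance

-- ===== CLAIM (what is proved, stated in full; the proofs are below) =====
def Claim_equal_countGoodRectangles : Prop := ∀ (rectangles : List (List Int)), Dom_countGoodRectangles rectangles → Pre_countGoodRectangles rectangles → Spec_countGoodRectangles rectangles (countGoodRectangles rectangles)

-- ===== LEMMAS AND PROOFS =====

-- A's step, expressed on the short side alone
def aStep (st : Int × Int) (s : Int) : Int × Int :=
  if s > st.1 then (s, 1)
  else if s = st.1 then (st.1, st.2 + 1)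
  else st

-- Characterisation of A's loop: the final max is foldl max M sides, the final count is
-- the number of occurrences of that max (plus c when the max never moved).
theorem aStep_foldl (sides : List Int) : ∀ (M c : Int),
    sides.foldl aStep (M, c)
      = (sides.foldl max M,
         (if sides.foldl max M = M then c else 0) + (sides.count (sides.foldl max M) : Int)) := by
  induction sides with
  | nil => intro M c; simp
  | cons s t ih =>
    intro M c
    simp only [List.foldl_cons, List.count_cons]
    by_cases h1 : M < s
    · have : aStep (M, c) s = (s, 1) := by simp [aStep, h1]
      rw [this, ih s 1]
      simp only [max_eq_right h1.le]
      have hle : s ≤ t.foldl max s := (PySem.List.le_foldl_max t s).1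
      have hne : ¬ t.foldl max s = M := by omega
      rw [if_neg hne]
      by_cases h2 : (s == t.foldl max s) = true
      · have h2' : s = t.foldl max s := by simpa using h2
        simp [← h2']; omega
      · have h2' : ¬ List.foldl max s t = s := fun e => h2 (by simp [e])
        simp [h2, h2']
    · by_cases h2 : s = M
      · have : aStep (M, c) s = (M, c + 1) := by simp [aStep, h2]
        rw [this, ih M (c + 1)]
        simp only [max_eq_left (show s ≤ M by omega)]
        have hle : M ≤ t.foldl max M := (PySem.List.le_foldl_max t M).1
        by_cases h3 : t.foldl max M = M
        · simp [h3, h2]; omega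
        · have : ¬ (s == t.foldl max M) = true := by
            simp only [beq_iff_eq]; omega
          simp [h3, this]
      · have : aStep (M, c) s = (M, c) := by simp [aStep, h1, h2]
        rw [this, ih M c]
        simp only [max_eq_left (show s ≤ M by omega)]
        have hle : M ≤ t.foldl max M := (PySem.List.le_foldl_max t M).1
        have : ¬ (s == t.foldl max M) = true := by
          simp only [beq_iff_eq]; omega
        simp [this]

theorem countGoodRectangles_spec : Claim_equal_countGoodRectangles := by
  intro rectangles _ hpre
  unfold Spec_countGoodRectangles countGoodRectangles countGoodRectangles_alt
  -- rewrite A's fold over rectangles as a fold of aStep over the mapped short sides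
  have hstep : rectangles.foldl
      (fun (st : Int × Int) r =>
        match r with
        | [length, width] =>
          let curr_len := min length width
          if curr_len > st.1 then (curr_len, 1)
          else if curr_len = st.1 then (st.1, st.2 + 1)
          else st
        | _ => st)
      (0, 0)
      = (rectangles.map
          (fun r => min (r.getD 0 0) (r.getD 1 0))).foldl aStep (0, 0) := by
    rw [List.foldl_map]
    apply PySem.List.foldl_congr_mem
    intro st r hr
    obtain ⟨l, w, hlw⟩ : ∃ l w, r = [l, w] := by
      have h2 := hpre r hr
      match r, h2 with
      | [l, w], _ => exact ⟨l, w, rfl⟩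
    subst hlw
    simp [aStep]
  rw [hstep, aStep_foldl]
  simp only [PySem.List.max?_id_cons, Option.getD_some, PySem.List.count_eq]
  split_ifs <;> simp
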